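-- pv_equiv track=rewrite | github.com/Aurelius10/kattisTasks | medium/completed/4thought/solution.py | one_one_two
-- ===== SOURCE A (Python) =====
-- ones = 4
--
-- ones_string = "4"
--
-- twos = [1, 16]
--
-- twos_string = ["4 / 4", "4 * 4"]
--
-- op = [" + ", " - "]
--
-- def one_one_two(num, op=op, ones=ones, ones_string=ones_string, twos=twos, twos_string=twos_string):
--     for operator1 in op:
--         if operator1 == " + ":
--             res_temp = ones + ones
--         else:
--             res_temp = ones - ones
--         for operator2 in op:
--             for j in range(2):
--                 if operator2 == " + ":
--                     res = res_temp + twos[j]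
--                 else:
--                     res = res_temp - twos[j]
--                 if res == num:
--                     return ones_string + operator1 + ones_string + operator2 + twos_string[j] + " = " + str(num)
--     return "0"
-- ===== SOURCE B (Python) =====
-- ones = 4
-- ones_string = "4"
-- twos = [1, 16]
-- twos_string = ["4 / 4", "4 * 4"]
-- op = [" + ", " - "]
--
-- def one_one_two(num, op=op, ones=ones, ones_string=ones_string, twos=twos, twos_string=twos_string):
--     # Solve the equation backwards: num = base +/- twos[j], so look the needed
--     # twos-value (num - base, negated for subtraction) up in twos instead of
--     # enumerating every forward computation.
--     for operator1 in op:
--         base = ones + ones if operator1 == " + " else ones - ones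
--         diff = num - base
--         for operator2 in op:
--             target = diff if operator2 == " + " else -diff
--             if target in twos:
--                 j = twos.index(target)
--                 return ones_string + operator1 + ones_string + operator2 + twos_string[j] + " = " + str(num)
--     return "0"
-- ===== Notes on version B (the rewrite author's own statement) =====
-- stated objective: alternative
-- what changed: B solves the equation backwards: per operator pair it computes the twos-value the expression would need (num - base, negated for subtraction) and looks it up in twos with membership/index, replacing A's innermost forward-enumeration loop over j that computes and compares every candidate result.
import Mathlib
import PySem

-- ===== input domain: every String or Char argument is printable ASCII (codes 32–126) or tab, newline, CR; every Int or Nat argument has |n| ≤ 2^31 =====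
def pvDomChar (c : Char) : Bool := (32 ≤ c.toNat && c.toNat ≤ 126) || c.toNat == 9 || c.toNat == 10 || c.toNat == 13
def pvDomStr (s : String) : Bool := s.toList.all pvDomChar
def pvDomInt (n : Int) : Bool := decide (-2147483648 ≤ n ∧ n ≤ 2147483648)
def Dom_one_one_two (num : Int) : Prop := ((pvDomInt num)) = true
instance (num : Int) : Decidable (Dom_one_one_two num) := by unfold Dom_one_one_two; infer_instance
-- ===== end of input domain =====

-- B replaces A's innermost forward enumeration (compute every candidate result, compare
-- with num) by a backward solve: look the needed twos-value up in twos. Return values equal.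

-- ===== PORT A =====
-- A's inner `for j in range(2)` indexes twos[j]/twos_string[j]; ported as structural
-- recursion over the zipped pair lists (exact: both lists have length 2 = range(2)).
def owtLoopJ (num res_temp : Int) (op1 op2 : String) : List (Int × String) → Option String
  | [] => none
  | (t, s) :: rest =>
      let res := if op2 == " + " then res_temp + t else res_temp - t
      if res == num then some ("4" ++ op1 ++ "4" ++ op2 ++ s ++ " = " ++ PySem.Int.toStr num)
      else owtLoopJ num res_temp op1 op2 rest

def owtLoopOp2 (num res_temp : Int) (op1 : String) : List String → Option String
  | [] => none
  | op2 :: rest =>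
      match owtLoopJ num res_temp op1 op2 [(1, "4 / 4"), (16, "4 * 4")] with
      | some r => some r
      | none => owtLoopOp2 num res_temp op1 rest

def owtLoopOp1 (num : Int) : List String → Option String
  | [] => none
  | op1 :: rest =>
      let res_temp : Int := if op1 == " + " then 4 + 4 else 4 - 4
      match owtLoopOp2 num res_temp op1 [" + ", " - "] with
      | some r => some r
      | none => owtLoopOp1 num rest

def one_one_two (num : Int) : String :=
  (owtLoopOp1 num [" + ", " - "]).getD "0"

-- ===== PORT B =====
-- `twos.index(target)` → PySem.List.index?; `twos_string[j]` is in range whenever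
-- index? succeeds (both lists have length 2), ported with List.getD (exact there).
def altLoop2 (num diff : Int) (op1 : String) : List String → Option String
  | [] => none
  | op2 :: rest =>
      let target := if op2 == " + " then diff else -diff
      match PySem.List.index? [(1 : Int), 16] target with
      | some j => some ("4" ++ op1 ++ "4" ++ op2 ++ (["4 / 4", "4 * 4"].getD j "") ++ " = " ++ PySem.Int.toStr num)
      | none => altLoop2 num diff op1 rest

def altLoop1 (num : Int) : List String → Option String
  | [] => none
  | op1 :: rest =>
      let base : Int := if op1 == " + " then 4 + 4 else 4 - 4
      match altLoop2 num (num - base) op1 [" + ", " - "] with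
      | some r => some r
      | none => altLoop1 num rest

def one_one_two_alt (num : Int) : String :=
  (altLoop1 num [" + ", " - "]).getD "0"

-- ===== PRECONDITION & SPEC =====
def Spec_one_one_two (num : Int) (out : String) : Prop := out = one_one_two_alt num
instance (num : Int) (out : String) : Decidable (Spec_one_one_two num out) := by unfold Spec_one_one_two; infer_instance

-- ===== CLAIM (what is proved, stated in full; the proofs are below) =====
def Claim_equal_one_one_two : Prop := ∀ (num : Int), Dom_one_one_two num → Spec_one_one_two num (one_one_two num)

-- ===== LEMMAS AND PROOFS =====
theorem owt_eq (num : Int) : one_one_two num = one_one_two_alt num := by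
  by_cases h9 : num = 9
  · subst h9; decide
  by_cases h24 : num = 24
  · subst h24; decide
  by_cases h7 : num = 7
  · subst h7; decide
  by_cases hm8 : num = -8
  · subst hm8; decide
  by_cases h1 : num = 1
  · subst h1; decide
  by_cases h16 : num = 16
  · subst h16; decide
  by_cases hm1 : num = -1
  · subst hm1; decide
  by_cases hm16 : num = -16
  · subst hm16; decide
  · -- no combination matches: both return "0"
    have b9 : ((9:Int) == num) = false := by simp [Ne.symm h9]
    have b24 : ((24:Int) == num) = false := by simp [Ne.symm h24]
    have b7 : ((7:Int) == num) = false := by simp [Ne.symm h7]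
    have bm8 : ((-8:Int) == num) = false := by simp [Ne.symm hm8]
    have b1 : ((1:Int) == num) = false := by simp [Ne.symm h1]
    have b16 : ((16:Int) == num) = false := by simp [Ne.symm h16]
    have bm1 : ((-1:Int) == num) = false := by simp [Ne.symm hm1]
    have bm16 : ((-16:Int) == num) = false := by simp [Ne.symm hm16]
    have t1 : ((1:Int) == num - 8) = false := by simp only [beq_eq_false_iff_ne]; omega
    have t2 : ((16:Int) == num - 8) = false := by simp only [beq_eq_false_iff_ne]; omega
    have t3 : ((1:Int) == 8 - num) = false := by simp only [beq_eq_false_iff_ne]; omega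
    have t4 : ((16:Int) == 8 - num) = false := by simp only [beq_eq_false_iff_ne]; omega
    have t7 : ((1:Int) == -num) = false := by simp only [beq_eq_false_iff_ne]; omega
    have t8 : ((16:Int) == -num) = false := by simp only [beq_eq_false_iff_ne]; omega
    simp [one_one_two, one_one_two_alt, owtLoopOp1, owtLoopOp2, owtLoopJ,
      altLoop1, altLoop2, PySem.List.index?, List.idxOf?, List.findIdx?, List.findIdx?.go,
      b9, b24, b7, bm8, b1, b16, bm1, bm16, t1, t2, t3, t4, t7, t8]

-- ===== VERDICT (by name: the statement is the Claim_ definition above) =====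
theorem one_one_two_spec : Claim_equal_one_one_two := by
  intro num _
  unfold Spec_one_one_two
  exact owt_eq num
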